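-- pv_equiv track=rewrite | github.com/jzyzak/cs1240-progset2 | strassen.py | combining_results
-- ===== SOURCE A (Python) =====
-- def combining_results(AE_BG, AF_BH, CE_DG, CF_DH):
--     n = len(AE_BG)
--     #C = [[0]*n for _ in range(n)]
--     C = [[0] * (2 * n) for _ in range(2 * n)]
--     for i in range(n):
--         for j in range(n):
--             C[i][j] = AE_BG[i][j]
--             C[i][j+n] = AF_BH[i][j]
--             C[i+n][j] = CE_DG[i][j]
--             C[i+n][j+n] = CF_DH[i][j]
--     return C
-- ===== SOURCE B (Python) =====
-- def combining_results(AE_BG, AF_BH, CE_DG, CF_DH):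
--     n = len(AE_BG)
--     top = [AE_BG[i][:n] + AF_BH[i][:n] for i in range(n)]
--     bottom = [CE_DG[i][:n] + CF_DH[i][:n] for i in range(n)]
--     return top + bottom
-- ===== Notes on version B (the rewrite author's own statement) =====
-- stated objective: simpler
-- what changed: Instead of preallocating a 2n x 2n zero matrix and filling it cell by cell with a nested i/j loop, B builds each output row directly as the concatenation of the two quadrant rows (clipped to the leading n entries) and returns top rows followed by bottom rows; no preallocation and no inner index loop.
import Mathlib
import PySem

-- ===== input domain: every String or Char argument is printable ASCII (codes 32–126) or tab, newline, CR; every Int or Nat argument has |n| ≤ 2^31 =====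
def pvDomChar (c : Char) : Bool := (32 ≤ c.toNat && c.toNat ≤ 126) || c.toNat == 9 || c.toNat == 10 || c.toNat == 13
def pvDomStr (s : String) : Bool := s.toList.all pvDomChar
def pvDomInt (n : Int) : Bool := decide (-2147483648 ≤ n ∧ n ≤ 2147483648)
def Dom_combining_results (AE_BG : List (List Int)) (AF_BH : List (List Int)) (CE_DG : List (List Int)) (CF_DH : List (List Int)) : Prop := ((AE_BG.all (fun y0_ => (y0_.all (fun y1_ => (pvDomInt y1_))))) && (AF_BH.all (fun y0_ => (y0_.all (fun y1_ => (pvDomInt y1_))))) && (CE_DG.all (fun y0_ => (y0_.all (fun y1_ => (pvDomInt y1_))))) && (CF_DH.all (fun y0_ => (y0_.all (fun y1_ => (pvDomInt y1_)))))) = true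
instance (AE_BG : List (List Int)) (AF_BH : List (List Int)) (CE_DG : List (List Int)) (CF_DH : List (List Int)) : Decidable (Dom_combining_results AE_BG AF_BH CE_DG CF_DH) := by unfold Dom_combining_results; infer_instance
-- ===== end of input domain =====

-- B assembles each output row by concatenating the two quadrant rows instead of
-- filling a preallocated 2n x 2n zero matrix cell by cell (objective: simpler).

-- ===== PORT A =====
-- C[i][j] = v  (i, j are the in-range nonnegative indices Python's loop produces;
-- reads outside a row's range fall back to the default 0, which only happens
-- outside Pre_, where Python raises IndexError)
def setCell (C : List (List Int)) (i j : Nat) (v : Int) : List (List Int) :=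
  C.set i ((C.getD i []).set j v)

-- the body of the inner j-loop: the four assignments of one (i, j) iteration
def innerStep (AE_BG AF_BH CE_DG CF_DH : List (List Int)) (n i : Nat)
    (C : List (List Int)) (j : Nat) : List (List Int) :=
  setCell
    (setCell
      (setCell
        (setCell C i j ((AE_BG.getD i []).getD j 0))
        i (j + n) ((AF_BH.getD i []).getD j 0))
      (i + n) j ((CE_DG.getD i []).getD j 0))
    (i + n) (j + n) ((CF_DH.getD i []).getD j 0)

def combining_results (AE_BG : List (List Int)) (AF_BH : List (List Int)) (CE_DG : List (List Int)) (CF_DH : List (List Int)) : List (List Int) :=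
  let n := AE_BG.length
  let C := List.replicate (2 * n) (List.replicate (2 * n) (0 : Int))
  (List.range n).foldl
    (fun C i => (List.range n).foldl (innerStep AE_BG AF_BH CE_DG CF_DH n i) C) C

-- ===== PORT B =====
-- row[:n] with n = len(AE_BG) ≥ 0 is exactly List.take n
def combining_results_alt (AE_BG : List (List Int)) (AF_BH : List (List Int)) (CE_DG : List (List Int)) (CF_DH : List (List Int)) : List (List Int) :=
  let n := AE_BG.length
  let top := (List.range n).map (fun i => (AE_BG.getD i []).take n ++ (AF_BH.getD i []).take n)
  let bottom := (List.range n).map (fun i => (CE_DG.getD i []).take n ++ (CF_DH.getD i []).take n)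
  top ++ bottom

-- ===== PRECONDITION & SPEC =====
-- Pre_ is exactly the set of inputs on which Python A returns (elsewhere A raises
-- IndexError): the other three quadrants have at least n = len(AE_BG) rows and the
-- first n rows of all four quadrants have at least n entries.
def Pre_combining_results (AE_BG : List (List Int)) (AF_BH : List (List Int)) (CE_DG : List (List Int)) (CF_DH : List (List Int)) : Prop :=
  AE_BG.length ≤ AF_BH.length ∧ AE_BG.length ≤ CE_DG.length ∧ AE_BG.length ≤ CF_DH.length ∧
  (∀ r ∈ AE_BG.take AE_BG.length, AE_BG.length ≤ r.length) ∧
  (∀ r ∈ AF_BH.take AE_BG.length, AE_BG.length ≤ r.length) ∧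
  (∀ r ∈ CE_DG.take AE_BG.length, AE_BG.length ≤ r.length) ∧
  (∀ r ∈ CF_DH.take AE_BG.length, AE_BG.length ≤ r.length)
instance (AE_BG : List (List Int)) (AF_BH : List (List Int)) (CE_DG : List (List Int)) (CF_DH : List (List Int)) : Decidable (Pre_combining_results AE_BG AF_BH CE_DG CF_DH) := by unfold Pre_combining_results; infer_instance

def pvWitness_combining_results : List (List Int) × List (List Int) × List (List Int) × List (List Int) :=
  ([[1, 2], [3, 4]], [[5, 6], [7, 8]], [[9, 10], [11, 12]], [[13, 14], [15, 16]])

def Spec_combining_results (AE_BG : List (List Int)) (AF_BH : List (List Int)) (CE_DG : List (List Int)) (CF_DH : List (List Int)) (out : List (List Int)) : Prop := out = combining_results_alt AE_BG AF_BH CE_DG CF_DH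
instance (AE_BG : List (List Int)) (AF_BH : List (List Int)) (CE_DG : List (List Int)) (CF_DH : List (List Int)) (out : List (List Int)) : Decidable (Spec_combining_results AE_BG AF_BH CE_DG CF_DH out) := by unfold Spec_combining_results; infer_instance

-- ===== CLAIM (what is proved, stated in full; the proofs are below) =====
def Claim_equal_combining_results : Prop := ∀ (AE_BG : List (List Int)) (AF_BH : List (List Int)) (CE_DG : List (List Int)) (CF_DH : List (List Int)), Dom_combining_results AE_BG AF_BH CE_DG CF_DH → Pre_combining_results AE_BG AF_BH CE_DG CF_DH → Spec_combining_results AE_BG AF_BH CE_DG CF_DH (combining_results AE_BG AF_BH CE_DG CF_DH)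

-- ===== LEMMAS AND PROOFS =====

-- the effect of one inner-loop iteration on one row (top half: values a, bottom: values b)
def rowStep (a b : List Int) (n : Nat) (r : List Int) (j : Nat) : List Int :=
  (r.set j (a.getD j 0)).set (j + n) (b.getD j 0)

-- final value of a row: the inner loop run over range n, started from the zero row
def rowFold (a b : List Int) (n : Nat) : List Int :=
  (List.range n).foldl (rowStep a b n) (List.replicate (2 * n) 0)

theorem getD_set_self (C : List (List Int)) (i : Nat) (r : List Int) (hi : i < C.length) :
    (C.set i r).getD i [] = r := by
  simp [List.getD_eq_getElem?_getD, List.getElem?_set_self hi]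

theorem getD_set_ne (C : List (List Int)) (i k : Nat) (r : List Int) (h : i ≠ k) :
    (C.set i r).getD k [] = C.getD k [] := by
  simp [List.getD_eq_getElem?_getD, List.getElem?_set_ne h]

theorem innerStep_eq (AE_BG AF_BH CE_DG CF_DH : List (List Int)) (n i j : Nat)
    (C : List (List Int)) (hC : C.length = 2 * n) (hi : i < n) :
    innerStep AE_BG AF_BH CE_DG CF_DH n i C j =
      (C.set i (rowStep (AE_BG.getD i []) (AF_BH.getD i []) n (C.getD i []) j)).set (i + n)
        (rowStep (CE_DG.getD i []) (CF_DH.getD i []) n (C.getD (i + n) []) j) := by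
  have hi2 : i < C.length := by omega
  simp only [innerStep, setCell, rowStep]
  rw [getD_set_self _ _ _ hi2, List.set_set,
      getD_set_ne _ i (i + n) _ (by omega),
      getD_set_self _ _ _ (by simpa using (show i + n < C.length by omega)),
      List.set_set, getD_set_ne _ i (i + n) _ (by omega)]

theorem foldl_innerStep (AE_BG AF_BH CE_DG CF_DH : List (List Int)) (n i : Nat)
    (L : List Nat) (C : List (List Int)) (hC : C.length = 2 * n) (hi : i < n) :
    L.foldl (innerStep AE_BG AF_BH CE_DG CF_DH n i) C =
      (C.set i (L.foldl (rowStep (AE_BG.getD i []) (AF_BH.getD i []) n) (C.getD i []))).set (i + n)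
        (L.foldl (rowStep (CE_DG.getD i []) (CF_DH.getD i []) n) (C.getD (i + n) [])) := by
  induction L generalizing C with
  | nil =>
    have hi2 : i < C.length := by omega
    have hin : i + n < C.length := by omega
    simp only [List.foldl_nil]
    rw [List.getD_eq_getElem C [] hi2, List.getD_eq_getElem C [] hin,
        List.set_getElem_self hi2]
    exact (List.set_getElem_self hin).symm
  | cons j L ih =>
    simp only [List.foldl_cons]
    rw [innerStep_eq AE_BG AF_BH CE_DG CF_DH n i j C hC hi]
    set R1 := rowStep (AE_BG.getD i []) (AF_BH.getD i []) n (C.getD i []) j with hR1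
    set R2 := rowStep (CE_DG.getD i []) (CF_DH.getD i []) n (C.getD (i + n) []) j with hR2
    rw [ih ((C.set i R1).set (i + n) R2) (by simpa using hC)]
    have e1 : ((C.set i R1).set (i + n) R2).getD i [] = R1 := by
      rw [getD_set_ne _ (i + n) i _ (by omega), getD_set_self _ _ _ (by omega)]
    have e2 : ((C.set i R1).set (i + n) R2).getD (i + n) [] = R2 := by
      rw [getD_set_self _ _ _ (by simpa using (show i + n < C.length by omega))]
    rw [e1, e2, List.set_comm _ _ (by omega : i + n ≠ i), List.set_set, List.set_set]

theorem outer_fold (AE_BG AF_BH CE_DG CF_DH : List (List Int)) (n m : Nat)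
    (hm : m ≤ n) :
    (List.range m).foldl
        (fun C i => (List.range n).foldl (innerStep AE_BG AF_BH CE_DG CF_DH n i) C)
        (List.replicate (2 * n) (List.replicate (2 * n) (0 : Int))) =
      (List.range m).map (fun i => rowFold (AE_BG.getD i []) (AF_BH.getD i []) n) ++
        List.replicate (n - m) (List.replicate (2 * n) (0 : Int)) ++
        ((List.range m).map (fun i => rowFold (CE_DG.getD i []) (CF_DH.getD i []) n) ++
          List.replicate (n - m) (List.replicate (2 * n) (0 : Int))) := by
  induction m with
  | zero =>
    rw [two_mul, List.replicate_add]; simp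
  | succ m ih =>
    have hm' : m ≤ n := by omega
    rw [List.range_succ]
    simp only [List.foldl_append, List.map_append, List.map_cons, List.map_nil,
      List.foldl_cons, List.foldl_nil]
    rw [ih hm']
    simp only [rowFold]
    set z := List.replicate (2 * n) (0 : Int) with hz
    set T := (List.range m).map (fun i =>
      (List.range n).foldl (rowStep (AE_BG.getD i []) (AF_BH.getD i []) n) z) with hT
    set B := (List.range m).map (fun i =>
      (List.range n).foldl (rowStep (CE_DG.getD i []) (CF_DH.getD i []) n) z) with hB
    have hTlen : T.length = m := by simp [hT]
    have hBlen : B.length = m := by simp [hB]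
    have hMlen : (T ++ List.replicate (n - m) z ++ (B ++ List.replicate (n - m) z)).length
        = 2 * n := by
      simp [hTlen, hBlen, hz]; omega
    rw [foldl_innerStep AE_BG AF_BH CE_DG CF_DH n m _ _ hMlen (by omega)]
    have hrep : List.replicate (n - m) z = z :: List.replicate (n - (m + 1)) z := by
      have h : n - m = (n - (m + 1)) + 1 := by omega
      rw [h, List.replicate_succ]
    have eM1 : (T ++ List.replicate (n - m) z ++ (B ++ List.replicate (n - m) z)).getD m []
        = z := by
      rw [List.getD_eq_getElem?_getD,
          List.getElem?_append_left (by simp [hTlen]; omega),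
          List.getElem?_append_right (by omega : T.length ≤ m), hTlen, hrep]
      simp
    have eM2 : (T ++ List.replicate (n - m) z ++ (B ++ List.replicate (n - m) z)).getD (m + n) []
        = z := by
      rw [List.getD_eq_getElem?_getD,
          List.getElem?_append_right (by simp [hTlen]; try omega),
          List.getElem?_append_right (by simp [hTlen, hBlen]; try omega)]
      have hidx : m + n - (T ++ List.replicate (n - m) z).length - B.length = 0 := by
        simp [hTlen, hBlen]; omega
      rw [hidx, hrep]
      simp
    rw [eM1, eM2]
    set F1 := (List.range n).foldl (rowStep (AE_BG.getD m []) (AF_BH.getD m []) n) z with hF1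
    set F2 := (List.range n).foldl (rowStep (CE_DG.getD m []) (CF_DH.getD m []) n) z with hF2
    have hset1 : (T ++ List.replicate (n - m) z ++ (B ++ List.replicate (n - m) z)).set m F1
        = T ++ (F1 :: List.replicate (n - (m + 1)) z) ++ (B ++ List.replicate (n - m) z) := by
      rw [List.set_append, if_pos (by simp [hTlen]; omega),
          List.set_append, if_neg (by simp [hTlen]),
          hTlen, Nat.sub_self, hrep, List.set_cons_zero]
    have hlen2 : (T ++ (F1 :: List.replicate (n - (m + 1)) z)).length = n := by
      simp [hTlen]; omega
    have hset2 : (T ++ (F1 :: List.replicate (n - (m + 1)) z)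
          ++ (B ++ List.replicate (n - m) z)).set (m + n) F2
        = T ++ (F1 :: List.replicate (n - (m + 1)) z)
          ++ (B ++ (F2 :: List.replicate (n - (m + 1)) z)) := by
      rw [List.set_append, if_neg (by rw [hlen2]; omega), hlen2, Nat.add_sub_cancel,
          List.set_append, if_neg (by simp [hBlen]),
          hBlen, Nat.sub_self, hrep, List.set_cons_zero]
    rw [hset1, hset2]
    simp [List.append_assoc]

theorem rowFold_aux (a b : List Int) (n m : Nat) (hm : m ≤ n)
    (ha : n ≤ a.length) (hb : n ≤ b.length) :
    (List.range m).foldl (rowStep a b n) (List.replicate (2 * n) (0 : Int)) =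
      a.take m ++ List.replicate (n - m) (0 : Int) ++
        (b.take m ++ List.replicate (n - m) (0 : Int)) := by
  induction m with
  | zero =>
    rw [two_mul, List.replicate_add]; simp
  | succ m ih =>
    rw [List.range_succ, List.foldl_append, ih (by omega)]
    simp only [List.foldl_cons, List.foldl_nil, rowStep]
    have hta : (a.take m).length = m := by simp; omega
    have htb : (b.take m).length = m := by simp; omega
    have hrep : List.replicate (n - m) (0 : Int) = 0 :: List.replicate (n - (m + 1)) 0 := by
      have h : n - m = (n - (m + 1)) + 1 := by omega
      rw [h, List.replicate_succ]
    have hga : a.take m ++ [a.getD m 0] = a.take (m + 1) := by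
      rw [List.take_add_one, List.getElem?_eq_getElem (by omega : m < a.length),
          List.getD_eq_getElem a 0 (by omega : m < a.length)]
      simp
    have hgb : b.take m ++ [b.getD m 0] = b.take (m + 1) := by
      rw [List.take_add_one, List.getElem?_eq_getElem (by omega : m < b.length),
          List.getD_eq_getElem b 0 (by omega : m < b.length)]
      simp
    have hset1 : (a.take m ++ List.replicate (n - m) (0 : Int)
          ++ (b.take m ++ List.replicate (n - m) 0)).set m (a.getD m 0)
        = a.take m ++ (a.getD m 0 :: List.replicate (n - (m + 1)) 0)
          ++ (b.take m ++ List.replicate (n - m) 0) := by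
      rw [List.set_append, if_pos (by simp [hta]; omega),
          List.set_append, if_neg (by simp [hta]),
          hta, Nat.sub_self, hrep, List.set_cons_zero]
    have hlen2 : (a.take m ++ (a.getD m 0 :: List.replicate (n - (m + 1)) (0 : Int))).length
        = n := by
      simp [hta]; omega
    have hset2 : (a.take m ++ (a.getD m 0 :: List.replicate (n - (m + 1)) (0 : Int))
          ++ (b.take m ++ List.replicate (n - m) 0)).set (m + n) (b.getD m 0)
        = a.take m ++ (a.getD m 0 :: List.replicate (n - (m + 1)) 0)
          ++ (b.take m ++ (b.getD m 0 :: List.replicate (n - (m + 1)) 0)) := by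
      rw [List.set_append, if_neg (by rw [hlen2]; omega), hlen2, Nat.add_sub_cancel,
          List.set_append, if_neg (by simp [htb]),
          htb, Nat.sub_self, hrep, List.set_cons_zero]
    rw [hset1, hset2, ← hga, ← hgb]
    simp [List.append_assoc]

theorem rowFold_eq (a b : List Int) (n : Nat) (ha : n ≤ a.length) (hb : n ≤ b.length) :
    rowFold a b n = a.take n ++ b.take n := by
  have h := rowFold_aux a b n n le_rfl ha hb
  simpa [rowFold] using h

-- ===== VERDICT (by name: the statement is the Claim_ definition above) =====
theorem combining_results_spec : Claim_equal_combining_results := by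
  intro AE_BG AF_BH CE_DG CF_DH _ hpre
  obtain ⟨h1, h2, h3, h4, h5, h6, h7⟩ := hpre
  rw [List.take_length] at h4
  unfold Spec_combining_results combining_results combining_results_alt
  rw [outer_fold AE_BG AF_BH CE_DG CF_DH AE_BG.length AE_BG.length le_rfl]
  simp only [Nat.sub_self, List.replicate_zero, List.append_nil]
  have row_len : ∀ (M : List (List Int)), AE_BG.length ≤ M.length →
      (∀ r ∈ M.take AE_BG.length, AE_BG.length ≤ r.length) →
      ∀ i < AE_BG.length, AE_BG.length ≤ (M.getD i []).length := by
    intro M hM hall i hi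
    rw [List.getD_eq_getElem M [] (by omega)]
    have : M[i] ∈ M.take AE_BG.length := by
      have hlt : i < (M.take AE_BG.length).length := by simp; omega
      have := List.getElem_mem hlt
      rwa [List.getElem_take] at this
    exact hall _ this
  have rlA : ∀ i < AE_BG.length, AE_BG.length ≤ ((AE_BG.getD i []).length) := by
    intro i hi
    rw [List.getD_eq_getElem AE_BG [] (by omega)]
    exact h4 _ (List.getElem_mem (by omega))
  have rlB := row_len AF_BH h1 h5
  have rlC := row_len CE_DG h2 h6
  have rlD := row_len CF_DH h3 h7
  congr 1
  · exact List.map_congr_left fun i hi =>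
      rowFold_eq _ _ _ (rlA i (List.mem_range.mp hi)) (rlB i (List.mem_range.mp hi))
  · exact List.map_congr_left fun i hi =>
      rowFold_eq _ _ _ (rlC i (List.mem_range.mp hi)) (rlD i (List.mem_range.mp hi))
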